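-- pv_equiv track=rewrite | github.com/ethanvert/15112-TP | Scrap.py | ct1
-- ===== SOURCE A (Python) =====
-- def ct1(s):
--   t = ''
--   u = t
--   n = 0
--   s = s[1:]
--   for c in s:
--     if c.isspace():
--       n += 1
--     elif c.islower():
--       t += c.upper() * n
--     elif c.isalpha():
--       u += c
--   return f'{t}-{u}-{n}'
-- ===== SOURCE B (Python) =====
-- def ct1(s):
--   r = s[1:]
--   n = sum(1 for c in r if c.isspace())
--   u = ''.join(c for c in r if c.isalpha() and not c.islower())
--   t = ''
--   k = 0
--   for c in r:
--     if c.isspace():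
--       k += 1
--     elif c.islower():
--       t += c.upper() * k
--   return f'{t}-{u}-{n}'
-- ===== Notes on version B (the rewrite author's own statement) =====
-- stated objective: alternative
-- what changed: Replaces A's single unified classification loop with three independent passes: a count of spaces, a filter building the uppercase-letter string, and a separate running-counter loop that only builds t.
import Mathlib
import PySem

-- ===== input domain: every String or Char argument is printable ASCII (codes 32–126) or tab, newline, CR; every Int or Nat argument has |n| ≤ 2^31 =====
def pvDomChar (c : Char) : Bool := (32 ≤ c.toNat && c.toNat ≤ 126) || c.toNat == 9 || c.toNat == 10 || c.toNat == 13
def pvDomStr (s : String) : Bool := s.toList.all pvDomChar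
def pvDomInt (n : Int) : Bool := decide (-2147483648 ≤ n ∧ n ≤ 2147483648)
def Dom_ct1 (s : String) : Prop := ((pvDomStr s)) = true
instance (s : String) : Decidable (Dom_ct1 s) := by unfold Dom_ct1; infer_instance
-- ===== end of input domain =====

-- B replaces A's single three-way classification loop by three independent passes
-- (space count, uppercase-letter filter, and a running-counter loop building only t);
-- objective: alternative decomposition, same cost.

-- ===== PORT A =====
-- the body of A's for-loop over s[1:], state (t, u, n)
def ct1StepA (acc : List Char × List Char × Int) (c : Char) : List Char × List Char × Int :=
  if PySem.Chars.isspace c then (acc.1, acc.2.1, acc.2.2 + 1)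
  else if PySem.Chars.islower c then
    (acc.1 ++ List.replicate acc.2.2.toNat (PySem.Chars.upperChar c), acc.2.1, acc.2.2)
  else if PySem.Chars.isalpha c then (acc.1, acc.2.1 ++ [c], acc.2.2)
  else acc

def ct1 (s : String) : String :=
  let r := PySem.List.slice s.toList (some 1) none
  let fin := r.foldl ct1StepA ([], [], 0)
  String.mk (fin.1 ++ '-' :: fin.2.1 ++ '-' :: PySem.Int.toChars fin.2.2)

-- ===== PORT B =====
-- the body of B's t-loop over s[1:], state (t, k)
def ct1StepT (acc : List Char × Int) (c : Char) : List Char × Int :=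
  if PySem.Chars.isspace c then (acc.1, acc.2 + 1)
  else if PySem.Chars.islower c then
    (acc.1 ++ List.replicate acc.2.toNat (PySem.Chars.upperChar c), acc.2)
  else acc

def ct1_alt (s : String) : String :=
  let r := PySem.List.slice s.toList (some 1) none
  let n : Int := (r.countP (fun c => PySem.Chars.isspace c) : Int)
  let u := r.filter (fun c => PySem.Chars.isalpha c && !PySem.Chars.islower c)
  let t := (r.foldl ct1StepT ([], 0)).1
  String.mk (t ++ '-' :: u ++ '-' :: PySem.Int.toChars n)

-- ===== PRECONDITION & SPEC =====
def Spec_ct1 (s : String) (out : String) : Prop := out = ct1_alt s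
instance (s : String) (out : String) : Decidable (Spec_ct1 s out) := by unfold Spec_ct1; infer_instance

-- ===== CLAIM (what is proved, stated in full; the proofs are below) =====
def Claim_equal_ct1 : Prop := ∀ (s : String), Dom_ct1 s → Spec_ct1 s (ct1 s)

-- ===== LEMMAS AND PROOFS =====

-- a whitespace character is never alphabetic (codes are disjoint by the PySem definitions)
lemma space_not_alpha (c : Char) (h : PySem.Chars.isspace c = true) :
    PySem.Chars.isalpha c = false := by
  simp only [PySem.Chars.isspace, PySem.Chars.isalpha, PySem.Chars.isupper, PySem.Chars.islower,
    Char.le_def, Bool.or_eq_true, Bool.and_eq_true, decide_eq_true_eq] at *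
  have hA : ('A' : Char).val.toNat = 65 := by decide
  have hZ : ('Z' : Char).val.toNat = 90 := by decide
  have ha : ('a' : Char).val.toNat = 97 := by decide
  have hz : ('z' : Char).val.toNat = 122 := by decide
  simp only [UInt32.le_iff_toNat_le, hA, hZ, ha, hz, Bool.or_eq_false_iff, Bool.and_eq_false_iff,
    decide_eq_false_iff_not, not_le] at *
  unfold Char.toNat at h
  omega

-- A's unified loop, started at (t, u, n), computes exactly B's three aggregates
lemma loop_eq (l : List Char) (t u : List Char) (n : Int) :
    l.foldl ct1StepA (t, u, n) =
      ((l.foldl ct1StepT (t, n)).1,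
       u ++ l.filter (fun c => PySem.Chars.isalpha c && !PySem.Chars.islower c),
       n + (l.countP (fun c => PySem.Chars.isspace c) : Int)) := by
  induction l generalizing t u n with
  | nil => simp
  | cons c l ih =>
    by_cases hs : PySem.Chars.isspace c = true
    · have ha := space_not_alpha c hs
      simp [List.foldl_cons, ct1StepA, ct1StepT, hs, ha, ih]
      ring
    · by_cases hl : PySem.Chars.islower c = true
      · simp [List.foldl_cons, ct1StepA, ct1StepT, hs, hl, ih]
      · by_cases hal : PySem.Chars.isalpha c = true
        · simp [List.foldl_cons, ct1StepA, ct1StepT, hs, hl, hal, ih]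
        · simp [List.foldl_cons, ct1StepA, ct1StepT, hs, hl, hal, ih]

-- ===== VERDICT (by name: the statement is the Claim_ definition above) =====
theorem ct1_spec : Claim_equal_ct1 := by
  intro s _
  show ct1 s = ct1_alt s
  unfold ct1 ct1_alt
  simp only [loop_eq]
  simp
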